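-- pv_equiv track=rewrite | github.com/AlexanderMarinsek/certify-pub | projects/certify-contracts/tests/stress_testing/utils.py | get_path_to_state
-- ===== SOURCE A (Python) =====
-- from typing import Literal
--
-- POSSIBLE_STATES = Literal[
--     "START",
--     "CREATED",
--     "LIVE",
-- ]
--
-- def get_path_to_state(
--
--     target_state: POSSIBLE_STATES,
--     current_state: POSSIBLE_STATES | None = None,
-- ) -> list[str]:
--     """
--     Returns a list of actions that transition from the start to the target state.
--     """
--     to_start = []
--     to_created = [*to_start, "create"]
--     to_live = [*to_created, "start"]
--
--     state_transitions = {
--         "START": to_start,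
--         "CREATED": to_created,
--         "LIVE": to_live,
--     }
--
--     if target_state not in state_transitions:
--         raise ValueError(f"Unknown target state: {target_state}")
--
--     if current_state is not None:
--         path = [
--             item
--             for item in state_transitions[target_state]
--             if item not in state_transitions[current_state]
--         ]
--     else:
--         path = state_transitions[target_state]
--
--     return path
-- ===== SOURCE B (Python) =====
-- _INDEX = {"START": 0, "CREATED": 1, "LIVE": 2}
-- _ACTIONS = ["create", "start"]
--
--
-- def get_path_to_state(target_state, current_state=None):
--     """
--     Returns a list of actions that transition from the start to the target state.
--     """
--     if target_state not in _INDEX: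
--         raise ValueError(f"Unknown target state: {target_state}")
--     return _ACTIONS[_INDEX.get(current_state, 0):_INDEX[target_state]]
-- ===== Notes on version B (the rewrite author's own statement) =====
-- stated objective: simpler
-- what changed: B maps each state to its index in the ordered action list and returns the closed-form slice _ACTIONS[_INDEX.get(current_state,0):_INDEX[target_state]], instead of building one path list per state and filtering the target path by membership in the current path.
import Mathlib
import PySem

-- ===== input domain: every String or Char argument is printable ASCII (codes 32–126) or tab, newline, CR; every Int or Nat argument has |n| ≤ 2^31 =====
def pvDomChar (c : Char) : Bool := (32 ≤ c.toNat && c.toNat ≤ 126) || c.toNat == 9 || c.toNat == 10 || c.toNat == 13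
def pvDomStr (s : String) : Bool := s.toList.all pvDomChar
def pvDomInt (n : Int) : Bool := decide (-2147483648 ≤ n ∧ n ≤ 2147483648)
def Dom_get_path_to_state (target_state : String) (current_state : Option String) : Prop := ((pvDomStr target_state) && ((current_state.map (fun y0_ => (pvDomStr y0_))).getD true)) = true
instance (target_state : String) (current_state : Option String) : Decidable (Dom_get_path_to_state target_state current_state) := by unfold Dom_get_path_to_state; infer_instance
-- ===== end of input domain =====

-- B replaces A's per-state path lists and membership filter by an index dict over one
-- ordered action list and a closed-form slice (objective: simpler).

-- ===== PORT A =====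
def get_path_to_state (target_state : String) (current_state : Option String) : List String :=
  let to_start : List String := []
  let to_created : List String := to_start ++ ["create"]
  let to_live : List String := to_created ++ ["start"]
  let state_transitions : PySem.Dict String (List String) :=
    ((PySem.Dict.empty.insert "START" to_start).insert "CREATED" to_created).insert "LIVE" to_live
  match state_transitions.get? target_state with
  | none => []          -- Python: raise ValueError (excluded by Pre_)
  | some tp =>
    match current_state with
    | some cs =>
      -- the comprehension looks up state_transitions[cs] once per item, so on an
      -- unknown cs Python raises KeyError iff tp is nonempty; getD's default is
      -- only reached when tp = [] and the filter returns [] anyway (exact)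
      tp.filter (fun item => !((state_transitions.getD cs []).contains item))
    | none => tp

-- ===== PORT B =====
def get_path_to_state_alt (target_state : String) (current_state : Option String) : List String :=
  let index : PySem.Dict String Int :=
    ((PySem.Dict.empty.insert "START" (0 : Int)).insert "CREATED" 1).insert "LIVE" 2
  let actions : List String := ["create", "start"]
  match index.get? target_state with
  | none => []          -- Python: raise ValueError (excluded by Pre_)
  | some j =>
    -- Python: _INDEX.get(current_state, 0); None is never a key of the dict,
    -- so the None case takes the default 0 (exact)
    let start : Int := match current_state with
      | none => 0
      | some cs => index.getD cs 0
    PySem.List.slice actions (some start) (some j)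

-- ===== PRECONDITION & SPEC =====
-- Pre_ is exactly A's return domain: the target must be a known state, and the current
-- state must be absent or known unless the target is the initial state (whose empty path
-- makes A's comprehension skip the current-state lookup). Outside Pre_ A raises
-- (ValueError on an unknown target, KeyError otherwise).
def Pre_get_path_to_state (target_state : String) (current_state : Option String) : Prop :=
  (["START", "CREATED", "LIVE"] : List String).contains target_state = true ∧
  (target_state = "START" ∨
    (current_state.map (fun cs => (["START", "CREATED", "LIVE"] : List String).contains cs)).getD true = true)
instance (target_state : String) (current_state : Option String) : Decidable (Pre_get_path_to_state target_state current_state) := by unfold Pre_get_path_to_state; infer_instance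
def pvWitness_get_path_to_state : String × Option String := ("LIVE", some "CREATED")

def Spec_get_path_to_state (target_state : String) (current_state : Option String) (out : List String) : Prop := out = get_path_to_state_alt target_state current_state
instance (target_state : String) (current_state : Option String) (out : List String) : Decidable (Spec_get_path_to_state target_state current_state out) := by unfold Spec_get_path_to_state; infer_instance

-- ===== CLAIM (what is proved, stated in full; the proofs are below) =====
def Claim_equal_get_path_to_state : Prop := ∀ (target_state : String) (current_state : Option String), Dom_get_path_to_state target_state current_state → Pre_get_path_to_state target_state current_state → Spec_get_path_to_state target_state current_state (get_path_to_state target_state current_state)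

-- ===== LEMMAS AND PROOFS =====
theorem mem_of_contains3 (s a b c : String)
    (h : ([a, b, c] : List String).contains s = true) : s = a ∨ s = b ∨ s = c := by
  rw [List.contains_eq_mem] at h
  simp only [decide_eq_true_eq, List.mem_cons, List.not_mem_nil, or_false] at h
  exact h

-- the index dict's stored values are 0, 1, 2, and the default is 0: always nonnegative
theorem index_getD_nonneg (cs : String) :
    0 ≤ (((PySem.Dict.empty.insert "START" (0 : Int)).insert "CREATED" 1).insert "LIVE" 2).getD cs 0 := by
  by_cases h1 : cs = "START"
  · subst h1; decide
  by_cases h2 : cs = "CREATED"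
  · subst h2; decide
  by_cases h3 : cs = "LIVE"
  · subst h3; decide
  have e1 : (("START" : String) == cs) = false := beq_eq_false_iff_ne.mpr (Ne.symm h1)
  have e2 : (("CREATED" : String) == cs) = false := beq_eq_false_iff_ne.mpr (Ne.symm h2)
  have e3 : (("LIVE" : String) == cs) = false := beq_eq_false_iff_ne.mpr (Ne.symm h3)
  simp [PySem.Dict.getD, PySem.Dict.get?, PySem.Dict.insert, PySem.Dict.empty, List.find?, e1, e2, e3]

theorem A_start (cs : String) : get_path_to_state "START" (some cs) = [] := rfl

theorem B_start (cs : String) : get_path_to_state_alt "START" (some cs) =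
    PySem.List.slice ["create", "start"]
      (some ((((PySem.Dict.empty.insert "START" (0 : Int)).insert "CREATED" 1).insert "LIVE" 2).getD cs 0)) (some 0) := rfl

theorem slice_actions_to_zero (i : Int) (h : 0 ≤ i) :
    PySem.List.slice (["create", "start"] : List String) (some i) (some 0) = [] := by
  obtain ⟨n, rfl⟩ := Int.eq_ofNat_of_zero_le h
  have := PySem.List.slice_natCast (["create", "start"] : List String) n 0
  simpa using this

-- ===== VERDICT (by name: the statement is the Claim_ definition above) =====
theorem get_path_to_state_spec : Claim_equal_get_path_to_state := by
  intro target_state current_state _ hpre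
  obtain ⟨ht, hrest⟩ := hpre
  rcases mem_of_contains3 _ _ _ _ ht with rfl | rfl | rfl
  · -- target "START": both return [] for every current_state
    cases current_state with
    | none => decide
    | some cs =>
      show get_path_to_state _ _ = get_path_to_state_alt _ _
      rw [A_start, B_start, slice_actions_to_zero _ (index_getD_nonneg cs)]
  all_goals {
    rcases hrest with h | h
    · exact absurd h (by decide)
    · cases current_state with
      | none => decide
      | some cs =>
        simp only [Option.map_some, Option.getD_some] at h
        rcases mem_of_contains3 _ _ _ _ h with rfl | rfl | rfl <;> decide }
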